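-- pv_equiv track=rewrite | github.com/yoonbang98/Backjoon | 백준/Platinum/23291. 어항 정리/어항 정리.py | fish_diff
-- ===== SOURCE A (Python) =====
-- def fish_diff(field):
--     dir = [(1,0),(0,1)]
--     N, M = len(field), len(field[0])
--     field_diff = [[0]*M for _ in range(N)]
--     for r in range(N):
--         for c in range(M):
--             if field[r][c]:
--                 for dr, dc in dir:
--                     nr, nc = r + dr, c + dc
--                     if 0 <= nr < N and 0 <= nc < M and field[nr][nc] and abs(field[nr][nc] - field[r][c])//5:
--                         d = abs(field[nr][nc] - field[r][c])//5
--                         if field[nr][nc] > field[r][c]: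
--                             field_diff[nr][nc] -= d
--                             field_diff[r][c] += d
--                         else:
--                             field_diff[nr][nc] += d
--                             field_diff[r][c] -= d
--     for r in range(N):
--         for c in range(M):
--             field[r][c] += field_diff[r][c]
--     return field
-- ===== SOURCE B (Python) =====
-- # Gather formulation: compute each cell's delta from its 4 neighbors in the
-- # original grid, then add the deltas in (same in-place mutation of field as A).
-- def fish_diff(field):
--     N, M = len(field), len(field[0])
--     delta = []
--     for r in range(N):
--         drow = []
--         for c in range(M):
--             v = field[r][c]
--             acc = 0
--             if v:
--                 for nr, nc in ((r - 1, c), (r + 1, c), (r, c - 1), (r, c + 1)):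
--                     if 0 <= nr < N and 0 <= nc < M:
--                         w = field[nr][nc]
--                         d = abs(w - v) // 5
--                         if w and d:
--                             acc += d if w > v else -d
--             drow.append(acc)
--         delta.append(drow)
--     for row, drow in zip(field, delta):
--         for c, d in enumerate(drow):
--             row[c] += d
--     return field
-- ===== Notes on version B (the rewrite author's own statement) =====
-- stated objective: alternative
-- what changed: Replaced the edge-based scatter (each of the two forward edges pushes +/-d to both endpoints of a difference grid) by a per-cell gather that computes each cell's delta from its four neighbors in the original grid.
import Mathlib
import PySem

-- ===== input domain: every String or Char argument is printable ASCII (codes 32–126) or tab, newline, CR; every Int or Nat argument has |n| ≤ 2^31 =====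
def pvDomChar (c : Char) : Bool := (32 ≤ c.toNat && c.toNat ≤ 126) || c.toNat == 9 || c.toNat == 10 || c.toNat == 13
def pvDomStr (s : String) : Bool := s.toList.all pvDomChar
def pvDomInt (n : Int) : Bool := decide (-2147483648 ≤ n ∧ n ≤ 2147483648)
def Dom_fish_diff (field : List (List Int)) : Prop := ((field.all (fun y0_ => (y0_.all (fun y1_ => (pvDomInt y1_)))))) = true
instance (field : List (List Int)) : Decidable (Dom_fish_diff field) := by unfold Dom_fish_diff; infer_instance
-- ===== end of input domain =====

-- B replaces A's edge-based scatter over a difference grid by a per-cell gather from the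
-- four neighbours of the original grid (return-value equivalence; the Python A and B both
-- mutate `field` in place in the same way).

-- ===== PORT A =====
-- `cellA g r c` ports Python's `g[r][c]` for the in-range indices guaranteed by the
-- loop bounds together with Pre_ (exact there); `addAt` ports `g[r][c] += a`.
def cellA (g : List (List Int)) (r c : Nat) : Int := (g.getD r []).getD c 0

def addAt (g : List (List Int)) (r c : Nat) (a : Int) : List (List Int) :=
  g.modify r (fun row => row.modify c (fun x => x + a))

-- body of A's innermost loop `for dr, dc in dir:` (scatter one edge)
def stepEdge (field : List (List Int)) (N M r c : Nat)
    (fd : List (List Int)) (dv : Nat × Nat) : List (List Int) :=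
  let nr := r + dv.1
  let nc := c + dv.2
  if nr < N ∧ nc < M ∧ cellA field nr nc ≠ 0 ∧
      (cellA field nr nc - cellA field r c).natAbs / 5 ≠ 0 then
    let d : Int := ((cellA field nr nc - cellA field r c).natAbs / 5 : Nat)
    if cellA field nr nc > cellA field r c then
      addAt (addAt fd nr nc (-d)) r c d
    else
      addAt (addAt fd nr nc d) r c (-d)
  else fd

-- body of A's `for c in range(M):` loop of the first sweep
def stepCell (field : List (List Int)) (N M r : Nat)
    (fd : List (List Int)) (c : Nat) : List (List Int) :=
  if cellA field r c ≠ 0 then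
    ([(1,0),(0,1)] : List (Nat × Nat)).foldl (stepEdge field N M r c) fd
  else fd

-- body of A's `for r in range(N):` loop of the first sweep
def stepRow (field : List (List Int)) (N M : Nat)
    (fd : List (List Int)) (r : Nat) : List (List Int) :=
  (List.range M).foldl (stepCell field N M r) fd

-- the first double loop of A: build field_diff by scattering over the two forward edges
def fdiffA (field : List (List Int)) (N M : Nat) : List (List Int) :=
  (List.range N).foldl (stepRow field N M) (List.replicate N (List.replicate M (0 : Int)))

-- A's second sweep: field[r][c] += field_diff[r][c]
def passCell (fd : List (List Int)) (r : Nat) (f : List (List Int)) (c : Nat) : List (List Int) :=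
  addAt f r c (cellA fd r c)

def passRow (fd : List (List Int)) (M : Nat) (f : List (List Int)) (r : Nat) : List (List Int) :=
  (List.range M).foldl (passCell fd r) f

def fish_diff (field : List (List Int)) : List (List Int) :=
  let N := field.length
  let M := (field.headD []).length
  let fd := fdiffA field N M
  (List.range N).foldl (passRow fd M) field

-- ===== PORT B =====
-- body of B's neighbour loop (one neighbour candidate `nb`)
def gstep (field : List (List Int)) (N M : Nat) (v acc : Int) (nb : Int × Int) : Int :=
  if 0 ≤ nb.1 ∧ nb.1 < (N : Int) ∧ 0 ≤ nb.2 ∧ nb.2 < (M : Int) then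
    let w := cellA field nb.1.toNat nb.2.toNat
    let d : Int := ((w - v).natAbs / 5 : Nat)
    if w ≠ 0 ∧ d ≠ 0 then acc + (if w > v then d else -d) else acc
  else acc

-- B's per-cell delta: gather from the four neighbours of (r,c) in the original grid
def gatherCell (field : List (List Int)) (N M : Nat) (r c : Nat) : Int :=
  let v := cellA field r c
  if v ≠ 0 then
    ([((r : Int) - 1, (c : Int)), ((r : Int) + 1, (c : Int)),
      ((r : Int), (c : Int) - 1), ((r : Int), (c : Int) + 1)]).foldl
      (gstep field N M v) 0
  else 0

-- B's final loop: add a delta row into a field row (extra tail of a longer row untouched)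
def addInto : List Int → List Int → List Int
  | row, [] => row
  | [], _ :: _ => []
  | x :: row, y :: ds => (x + y) :: addInto row ds

def fish_diff_alt (field : List (List Int)) : List (List Int) :=
  let N := field.length
  let M := (field.headD []).length
  let delta := (List.range N).map (fun r => (List.range M).map (fun c => gatherCell field N M r c))
  List.zipWith addInto field delta

-- ===== PRECONDITION & SPEC =====
-- Pre_ excludes exactly the inputs on which Python A raises: the empty grid
-- (len(field[0]) is an IndexError) and grids where some row is shorter than row 0
-- (field[r][c] raises IndexError during the sweep).
def Pre_fish_diff (field : List (List Int)) : Prop :=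
  field ≠ [] ∧ ∀ row ∈ field, (field.headD []).length ≤ row.length
instance (field : List (List Int)) : Decidable (Pre_fish_diff field) := by
  unfold Pre_fish_diff; infer_instance

def pvWitness_fish_diff : List (List Int) := [[1, 10], [3, 0]]

def Spec_fish_diff (field : List (List Int)) (out : List (List Int)) : Prop := out = fish_diff_alt field
instance (field : List (List Int)) (out : List (List Int)) : Decidable (Spec_fish_diff field out) := by unfold Spec_fish_diff; infer_instance

-- ===== CLAIM (what is proved, stated in full; the proofs are below) =====
def Claim_equal_fish_diff : Prop := ∀ (field : List (List Int)), Dom_fish_diff field → Pre_fish_diff field → Spec_fish_diff field (fish_diff field)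

-- ===== LEMMAS AND PROOFS =====

-- basic facts about addAt ------------------------------------------------------
theorem len_addAt (g : List (List Int)) (r c : Nat) (a : Int) :
    (addAt g r c a).length = g.length := by
  simp [addAt]

theorem rowlen_addAt (g : List (List Int)) (r c : Nat) (a : Int) (p : Nat) :
    ((addAt g r c a).getD p []).length = (g.getD p []).length := by
  simp only [addAt, List.getD_eq_getElem?_getD, List.getElem?_modify]
  cases h : g[p]? with
  | none => simp
  | some row => by_cases hrp : r = p <;> simp [hrp, List.length_modify]

theorem cellA_addAt (g : List (List Int)) (r c p q : Nat) (a : Int)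
    (hr : r < g.length) (hc : c < (g.getD r []).length) :
    cellA (addAt g r c a) p q = cellA g p q + (if r = p ∧ c = q then a else 0) := by
  have hrow : g.getD r [] = g[r] := by
    simp [List.getD_eq_getElem?_getD, List.getElem?_eq_getElem hr]
  simp only [cellA, addAt, List.getD_eq_getElem?_getD, List.getElem?_modify]
  by_cases hp : r = p
  · subst hp
    rw [List.getElem?_eq_getElem hr]
    simp only [Option.getD_some, List.getElem?_modify]
    by_cases hq : c = q
    · subst hq
      rw [hrow] at hc
      simp [List.getElem?_eq_getElem hc]
    · cases h : g[r][q]? <;> simp [hq, h]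
  · cases h : g[p]? <;> simp [hp, h]

-- shape invariants -------------------------------------------------------------
def ShapeZ (N M : Nat) (g : List (List Int)) : Prop :=
  g.length = N ∧ ∀ r, r < N → (g.getD r []).length = M

def ShapeP (field g : List (List Int)) : Prop :=
  g.length = field.length ∧ ∀ r, (g.getD r []).length = (field.getD r []).length

theorem ShapeZ_addAt (N M : Nat) (g : List (List Int)) (r c : Nat) (a : Int)
    (h : ShapeZ N M g) : ShapeZ N M (addAt g r c a) :=
  ⟨by rw [len_addAt]; exact h.1, fun p hp => by rw [rowlen_addAt]; exact h.2 p hp⟩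

theorem ShapeP_addAt (field g : List (List Int)) (r c : Nat) (a : Int)
    (h : ShapeP field g) : ShapeP field (addAt g r c a) :=
  ⟨by rw [len_addAt]; exact h.1, fun p => by rw [rowlen_addAt]; exact h.2 p⟩

theorem ShapeZ_base (N M : Nat) :
    ShapeZ N M (List.replicate N (List.replicate M (0 : Int))) := by
  refine ⟨by simp, fun r hr => ?_⟩
  rw [List.getD_eq_getElem?_getD, List.getElem?_replicate, if_pos hr]
  simp

theorem cellA_base (N M p q : Nat) :
    cellA (List.replicate N (List.replicate M (0 : Int))) p q = 0 := by
  simp only [cellA, List.getD_eq_getElem?_getD, List.getElem?_replicate]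
  by_cases hp : p < N
  · rw [if_pos hp]
    simp only [Option.getD_some, List.getElem?_replicate]
    by_cases hq : q < M <;> simp [hq]
  · simp [hp]

-- master lemma: a fold of cell-additive steps sums the per-step amounts --------
theorem foldl_cell_sum {ι : Type} (P : List (List Int) → Prop)
    (step : List (List Int) → ι → List (List Int)) (amt : ι → Int) (p q : Nat) :
    ∀ (l : List ι), (∀ g i, i ∈ l → P g → P (step g i)) →
      (∀ g i, i ∈ l → P g → cellA (step g i) p q = cellA g p q + amt i) →
      ∀ (g : List (List Int)), P g →
      P (l.foldl step g) ∧ cellA (l.foldl step g) p q = cellA g p q + (l.map amt).sum := by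
  intro l
  induction l with
  | nil => intro _ _ g hg; simpa using hg
  | cons i t ih =>
    intro hP hA g hg
    obtain ⟨h1, h2⟩ := ih (fun g j hj => hP g j (List.mem_cons_of_mem _ hj))
      (fun g j hj => hA g j (List.mem_cons_of_mem _ hj))
      (step g i) (hP g i (List.mem_cons_self) hg)
    refine ⟨h1, ?_⟩
    simp only [List.foldl_cons, List.map_cons, List.sum_cons]
    rw [h2, hA g i (List.mem_cons_self) hg]; ring

-- amounts of A's scatter, per edge / per cell / per row ------------------------
def dT (field : List (List Int)) (r c nr nc : Nat) : Int :=
  (((cellA field nr nc - cellA field r c).natAbs / 5 : Nat) : Int)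

def edgeAmt (field : List (List Int)) (N M : Nat) (r c : Nat) (dv : Nat × Nat) (p q : Nat) : Int :=
  if r + dv.1 < N ∧ c + dv.2 < M ∧ cellA field (r + dv.1) (c + dv.2) ≠ 0 ∧
      (cellA field (r + dv.1) (c + dv.2) - cellA field r c).natAbs / 5 ≠ 0 then
    (if r + dv.1 = p ∧ c + dv.2 = q then
      (if cellA field (r + dv.1) (c + dv.2) > cellA field r c then
        -dT field r c (r + dv.1) (c + dv.2) else dT field r c (r + dv.1) (c + dv.2)) else 0)
    + (if r = p ∧ c = q then
      (if cellA field (r + dv.1) (c + dv.2) > cellA field r c then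
        dT field r c (r + dv.1) (c + dv.2) else -dT field r c (r + dv.1) (c + dv.2)) else 0)
  else 0

def cellAmt (field : List (List Int)) (N M : Nat) (r c p q : Nat) : Int :=
  if cellA field r c ≠ 0 then
    (([(1,0),(0,1)] : List (Nat × Nat)).map (fun dv => edgeAmt field N M r c dv p q)).sum
  else 0

def rowAmt (field : List (List Int)) (N M : Nat) (r p q : Nat) : Int :=
  ((List.range M).map (fun c => cellAmt field N M r c p q)).sum

-- pass 1, level by level -------------------------------------------------------
theorem stepEdge_shape (field : List (List Int)) (N M r c : Nat)
    (g : List (List Int)) (dv : Nat × Nat) (hg : ShapeZ N M g) :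
    ShapeZ N M (stepEdge field N M r c g dv) := by
  simp only [stepEdge]
  split_ifs <;> first
    | exact hg
    | exact ShapeZ_addAt _ _ _ _ _ _ (ShapeZ_addAt _ _ _ _ _ _ hg)

theorem stepEdge_cell (field : List (List Int)) (N M r c p q : Nat)
    (g : List (List Int)) (dv : Nat × Nat) (hg : ShapeZ N M g) :
    cellA (stepEdge field N M r c g dv) p q = cellA g p q + edgeAmt field N M r c dv p q := by
  simp only [stepEdge]
  by_cases h1 : r + dv.1 < N ∧ c + dv.2 < M ∧ cellA field (r + dv.1) (c + dv.2) ≠ 0 ∧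
      (cellA field (r + dv.1) (c + dv.2) - cellA field r c).natAbs / 5 ≠ 0
  · have hrN : r < N := Nat.lt_of_le_of_lt (Nat.le_add_right _ _) h1.1
    have hcM : c < M := Nat.lt_of_le_of_lt (Nat.le_add_right _ _) h1.2.1
    have inner_len : r + dv.1 < g.length := by rw [hg.1]; exact h1.1
    have inner_row : c + dv.2 < (g.getD (r + dv.1) []).length := by
      rw [hg.2 _ h1.1]; exact h1.2.1
    have outer_len : ∀ z : Int, r < (addAt g (r + dv.1) (c + dv.2) z).length := fun z => by
      rw [len_addAt, hg.1]; exact hrN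
    have outer_row : ∀ z : Int, c < ((addAt g (r + dv.1) (c + dv.2) z).getD r []).length := fun z => by
      rw [rowlen_addAt, hg.2 r hrN]; exact hcM
    rw [if_pos h1]
    by_cases h2 : cellA field (r + dv.1) (c + dv.2) > cellA field r c
    · rw [if_pos h2,
        cellA_addAt _ _ _ _ _ _ (outer_len _) (outer_row _),
        cellA_addAt _ _ _ _ _ _ inner_len inner_row]
      simp only [edgeAmt, dT, if_pos h1, if_pos h2]
      ring
    · rw [if_neg h2,
        cellA_addAt _ _ _ _ _ _ (outer_len _) (outer_row _),
        cellA_addAt _ _ _ _ _ _ inner_len inner_row]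
      simp only [edgeAmt, dT, if_pos h1, if_neg h2]
      ring
  · rw [if_neg h1]
    simp only [edgeAmt, if_neg h1]
    ring

theorem stepCell_main (field : List (List Int)) (N M r c p q : Nat)
    (g : List (List Int)) (hg : ShapeZ N M g) :
    ShapeZ N M (stepCell field N M r g c) ∧
    cellA (stepCell field N M r g c) p q = cellA g p q + cellAmt field N M r c p q := by
  unfold stepCell cellAmt
  by_cases hv : cellA field r c ≠ 0
  · rw [if_pos hv, if_pos hv]
    exact foldl_cell_sum (ShapeZ N M) (stepEdge field N M r c)
      (fun dv => edgeAmt field N M r c dv p q) p q _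
      (fun g dv _ hg => stepEdge_shape field N M r c g dv hg)
      (fun g dv _ hg => stepEdge_cell field N M r c p q g dv hg) g hg
  · rw [if_neg hv, if_neg hv]
    exact ⟨hg, by ring⟩

theorem stepRow_main (field : List (List Int)) (N M r p q : Nat)
    (g : List (List Int)) (hg : ShapeZ N M g) :
    ShapeZ N M (stepRow field N M g r) ∧
    cellA (stepRow field N M g r) p q = cellA g p q + rowAmt field N M r p q := by
  unfold stepRow rowAmt
  exact foldl_cell_sum (ShapeZ N M) (stepCell field N M r)
    (fun c => cellAmt field N M r c p q) p q _
    (fun g c _ hg => (stepCell_main field N M r c p q g hg).1)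
    (fun g c _ hg => (stepCell_main field N M r c p q g hg).2) g hg

theorem fdiffA_cell (field : List (List Int)) (N M p q : Nat) :
    cellA (fdiffA field N M) p q = ((List.range N).map (fun r => rowAmt field N M r p q)).sum := by
  unfold fdiffA
  have h := foldl_cell_sum (ShapeZ N M) (stepRow field N M)
    (fun r => rowAmt field N M r p q) p q (List.range N)
    (fun g r _ hg => (stepRow_main field N M r p q g hg).1)
    (fun g r _ hg => (stepRow_main field N M r p q g hg).2)
    (List.replicate N (List.replicate M (0 : Int))) (ShapeZ_base N M)
  rw [h.2, cellA_base, zero_add]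

-- sums of indicators -----------------------------------------------------------
theorem sum_map_add {α : Type} (l : List α) (f g : α → Int) :
    (l.map (fun x => f x + g x)).sum = (l.map f).sum + (l.map g).sum := by
  induction l with
  | nil => simp
  | cons a t ih => simp only [List.map_cons, List.sum_cons, ih]; ring

theorem sum_map_ite (n a : Nat) (f : Nat → Int) :
    ((List.range n).map (fun r => if r = a then f r else 0)).sum = if a < n then f a else 0 := by
  induction n with
  | zero => simp
  | succ n ih =>
    rw [List.range_succ, List.map_append, List.sum_append, ih]
    by_cases h1 : a < n
    · rw [if_pos h1, if_pos (Nat.lt_succ_of_lt h1)]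
      have : ¬ (n = a) := by omega
      simp [this]
    · by_cases h2 : a = n
      · subst h2; simp [h1]
      · have : ¬ (a < n + 1) := by omega
        have hn : ¬ (n = a) := by omega
        simp [h1, this, hn]

theorem sum2_ite (N M a b : Nat) (f : Nat → Nat → Int) :
    ((List.range N).map (fun r => ((List.range M).map
      (fun c => if r = a ∧ c = b then f r c else 0)).sum)).sum
    = if a < N ∧ b < M then f a b else 0 := by
  have hin : ∀ r ∈ List.range N,
      ((List.range M).map (fun c => if r = a ∧ c = b then f r c else 0)).sum
      = if r = a then (if b < M then f r b else 0) else 0 := by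
    intro r _
    by_cases hr : r = a
    · subst hr
      rw [if_pos rfl]
      have : ∀ c ∈ List.range M, (if r = r ∧ c = b then f r c else 0) = (if c = b then f r c else 0) := by
        intro c _; simp
      rw [List.map_congr_left this, sum_map_ite]
    · rw [if_neg hr]
      have : ∀ c ∈ List.range M, (if r = a ∧ c = b then f r c else 0) = 0 := by
        intro c _; simp [hr]
      rw [List.map_congr_left this]; simp
  rw [List.map_congr_left hin, sum_map_ite]
  by_cases h1 : a < N <;> by_cases h2 : b < M <;> simp [h1, h2]

-- source / target halves of one scatter event ----------------------------------
def srcT (field : List (List Int)) (N M : Nat) (r c dr dc : Nat) : Int :=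
  if cellA field r c ≠ 0 then
    if r + dr < N ∧ c + dc < M ∧ cellA field (r + dr) (c + dc) ≠ 0 ∧
        (cellA field (r + dr) (c + dc) - cellA field r c).natAbs / 5 ≠ 0 then
      if cellA field (r + dr) (c + dc) > cellA field r c then
        dT field r c (r + dr) (c + dc) else -dT field r c (r + dr) (c + dc)
    else 0
  else 0

def tgtT (field : List (List Int)) (N M : Nat) (r c dr dc : Nat) : Int :=
  if cellA field r c ≠ 0 then
    if r + dr < N ∧ c + dc < M ∧ cellA field (r + dr) (c + dc) ≠ 0 ∧
        (cellA field (r + dr) (c + dc) - cellA field r c).natAbs / 5 ≠ 0 then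
      if cellA field (r + dr) (c + dc) > cellA field r c then
        -dT field r c (r + dr) (c + dc) else dT field r c (r + dr) (c + dc)
    else 0
  else 0

theorem cellAmt_split (field : List (List Int)) (N M r c p q : Nat) :
    cellAmt field N M r c p q =
      (if r = p ∧ c = q then srcT field N M r c 1 0 + srcT field N M r c 0 1 else 0)
      + (if r + 1 = p ∧ c = q then tgtT field N M r c 1 0 else 0)
      + (if r = p ∧ c + 1 = q then tgtT field N M r c 0 1 else 0) := by
  simp only [cellAmt, edgeAmt, srcT, tgtT, dT, List.map_cons, List.map_nil,
    List.sum_cons, List.sum_nil, Nat.add_zero, add_zero]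
  split_ifs <;> omega

-- the gather step, separated ---------------------------------------------------
theorem gstep_shift (field : List (List Int)) (N M : Nat) (v acc : Int) (nb : Int × Int) :
    gstep field N M v acc nb = acc + gstep field N M v 0 nb := by
  simp only [gstep]
  split_ifs <;> ring

-- the four neighbour terms of the gather, matched with scatter halves ---------
theorem gdown (field : List (List Int)) (N M p q : Nat) (hq : q < M)
    (hv : cellA field p q ≠ 0) :
    gstep field N M (cellA field p q) 0 ((p : Int) + 1, (q : Int)) = srcT field N M p q 1 0 := by
  have e1 : ((p : Int) + 1) = ((p + 1 : Nat) : Int) := by push_cast; ring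
  simp only [gstep, srcT, dT, e1, Int.toNat_natCast, Nat.add_zero, if_pos hv]
  split_ifs <;> omega

theorem gright (field : List (List Int)) (N M p q : Nat) (hp : p < N)
    (hv : cellA field p q ≠ 0) :
    gstep field N M (cellA field p q) 0 ((p : Int), (q : Int) + 1) = srcT field N M p q 0 1 := by
  have e1 : ((q : Int) + 1) = ((q + 1 : Nat) : Int) := by push_cast; ring
  simp only [gstep, srcT, dT, e1, Int.toNat_natCast, Nat.add_zero, if_pos hv]
  split_ifs <;> omega

theorem gup (field : List (List Int)) (N M p q : Nat) (hp : p < N) (hq : q < M)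
    (hv : cellA field p q ≠ 0) :
    gstep field N M (cellA field p q) 0 ((p : Int) - 1, (q : Int)) =
      if 1 ≤ p then tgtT field N M (p - 1) q 1 0 else 0 := by
  cases p with
  | zero =>
    simp only [gstep]
    norm_num
  | succ a =>
    have e1 : (((a + 1 : Nat) : Int) - 1) = ((a : Nat) : Int) := by push_cast; ring
    simp only [gstep, tgtT, dT, e1, Int.toNat_natCast, Nat.add_sub_cancel, Nat.add_zero,
      if_pos (by omega : 1 ≤ a + 1)]
    split_ifs <;> omega

theorem gleft (field : List (List Int)) (N M p q : Nat) (hp : p < N) (hq : q < M)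
    (hv : cellA field p q ≠ 0) :
    gstep field N M (cellA field p q) 0 ((p : Int), (q : Int) - 1) =
      if 1 ≤ q then tgtT field N M p (q - 1) 0 1 else 0 := by
  cases q with
  | zero =>
    simp only [gstep]
    norm_num
  | succ b =>
    have e1 : (((b + 1 : Nat) : Int) - 1) = ((b : Nat) : Int) := by push_cast; ring
    simp only [gstep, tgtT, dT, e1, Int.toNat_natCast, Nat.add_sub_cancel, Nat.add_zero,
      if_pos (by omega : 1 ≤ b + 1)]
    split_ifs <;> omega

theorem crux (field : List (List Int)) (N M p q : Nat) (hp : p < N) (hq : q < M) :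
    ((List.range N).map (fun r => rowAmt field N M r p q)).sum = gatherCell field N M p q := by
  -- split each row sum into its three indicator sums
  have hsplit : ∀ r ∈ List.range N, rowAmt field N M r p q =
      ((List.range M).map (fun c => if r = p ∧ c = q then
          srcT field N M r c 1 0 + srcT field N M r c 0 1 else 0)).sum
      + ((List.range M).map (fun c => if r + 1 = p ∧ c = q then tgtT field N M r c 1 0 else 0)).sum
      + ((List.range M).map (fun c => if r = p ∧ c + 1 = q then tgtT field N M r c 0 1 else 0)).sum := by
    intro r _
    unfold rowAmt
    rw [List.map_congr_left (fun c _ => cellAmt_split field N M r c p q)]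
    rw [sum_map_add (List.range M)
        (fun c => (if r = p ∧ c = q then srcT field N M r c 1 0 + srcT field N M r c 0 1 else 0)
          + (if r + 1 = p ∧ c = q then tgtT field N M r c 1 0 else 0))
        (fun c => if r = p ∧ c + 1 = q then tgtT field N M r c 0 1 else 0),
      sum_map_add (List.range M)
        (fun c => if r = p ∧ c = q then srcT field N M r c 1 0 + srcT field N M r c 0 1 else 0)
        (fun c => if r + 1 = p ∧ c = q then tgtT field N M r c 1 0 else 0)]
  rw [List.map_congr_left hsplit]
  rw [sum_map_add (List.range N) _ (fun r => ((List.range M).map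
      (fun c => if r = p ∧ c + 1 = q then tgtT field N M r c 0 1 else 0)).sum),
    sum_map_add (List.range N) (fun r => ((List.range M).map
      (fun c => if r = p ∧ c = q then srcT field N M r c 1 0 + srcT field N M r c 0 1 else 0)).sum)
      (fun r => ((List.range M).map
      (fun c => if r + 1 = p ∧ c = q then tgtT field N M r c 1 0 else 0)).sum)]
  -- collapse the three double sums
  have hD1 : ((List.range N).map (fun r => ((List.range M).map
      (fun c => if r = p ∧ c = q then srcT field N M r c 1 0 + srcT field N M r c 0 1 else 0)).sum)).sum
      = srcT field N M p q 1 0 + srcT field N M p q 0 1 := by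
    rw [sum2_ite N M p q (fun r c => srcT field N M r c 1 0 + srcT field N M r c 0 1),
      if_pos ⟨hp, hq⟩]
  have hD2 : ((List.range N).map (fun r => ((List.range M).map
      (fun c => if r + 1 = p ∧ c = q then tgtT field N M r c 1 0 else 0)).sum)).sum
      = if 1 ≤ p then tgtT field N M (p - 1) q 1 0 else 0 := by
    cases p with
    | zero =>
      have hz : ∀ r ∈ List.range N, ((List.range M).map
          (fun c => if r + 1 = 0 ∧ c = q then tgtT field N M r c 1 0 else 0)).sum = 0 := by
        intro r _
        have : ∀ c ∈ List.range M, (if r + 1 = 0 ∧ c = q then tgtT field N M r c 1 0 else 0) = 0 := by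
          intro c _; simp
        rw [List.map_congr_left this]; simp
      rw [List.map_congr_left hz]; simp
    | succ a =>
      have hre : ∀ r ∈ List.range N, ((List.range M).map
          (fun c => if r + 1 = a + 1 ∧ c = q then tgtT field N M r c 1 0 else 0)).sum
          = ((List.range M).map (fun c => if r = a ∧ c = q then tgtT field N M r c 1 0 else 0)).sum := by
        intro r _
        apply congrArg
        apply List.map_congr_left
        intro c _
        exact if_congr (by omega) rfl rfl
      rw [List.map_congr_left hre, sum2_ite N M a q (fun r c => tgtT field N M r c 1 0),
        if_pos ⟨by omega, hq⟩, if_pos (by omega : 1 ≤ a + 1)]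
      simp
  have hD3 : ((List.range N).map (fun r => ((List.range M).map
      (fun c => if r = p ∧ c + 1 = q then tgtT field N M r c 0 1 else 0)).sum)).sum
      = if 1 ≤ q then tgtT field N M p (q - 1) 0 1 else 0 := by
    cases q with
    | zero =>
      have hz : ∀ r ∈ List.range N, ((List.range M).map
          (fun c => if r = p ∧ c + 1 = 0 then tgtT field N M r c 0 1 else 0)).sum = 0 := by
        intro r _
        have : ∀ c ∈ List.range M, (if r = p ∧ c + 1 = 0 then tgtT field N M r c 0 1 else 0) = 0 := by
          intro c _; simp
        rw [List.map_congr_left this]; simp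
      rw [List.map_congr_left hz]; simp
    | succ b =>
      have hre : ∀ r ∈ List.range N, ((List.range M).map
          (fun c => if r = p ∧ c + 1 = b + 1 then tgtT field N M r c 0 1 else 0)).sum
          = ((List.range M).map (fun c => if r = p ∧ c = b then tgtT field N M r c 0 1 else 0)).sum := by
        intro r _
        apply congrArg
        apply List.map_congr_left
        intro c _
        exact if_congr (by omega) rfl rfl
      rw [List.map_congr_left hre, sum2_ite N M p b (fun r c => tgtT field N M r c 0 1),
        if_pos ⟨hp, by omega⟩, if_pos (by omega : 1 ≤ b + 1)]
      simp
  rw [hD1, hD2, hD3]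
  -- unfold the gather into its four neighbour terms
  by_cases hv : cellA field p q = 0
  · have h1 : srcT field N M p q 1 0 = 0 := by simp [srcT, hv]
    have h2 : srcT field N M p q 0 1 = 0 := by simp [srcT, hv]
    have h3 : (if 1 ≤ p then tgtT field N M (p - 1) q 1 0 else 0) = 0 := by
      by_cases h1p : 1 ≤ p
      · rw [if_pos h1p]
        simp only [tgtT]
        rw [show p - 1 + 1 = p from by omega]
        simp [hv]
      · rw [if_neg h1p]
    have h4 : (if 1 ≤ q then tgtT field N M p (q - 1) 0 1 else 0) = 0 := by
      by_cases h1q : 1 ≤ q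
      · rw [if_pos h1q]
        simp only [tgtT]
        rw [show q - 1 + 1 = q from by omega]
        simp [hv]
      · rw [if_neg h1q]
    rw [h1, h2, h3, h4]
    simp [gatherCell, hv]
  · have hfold : gatherCell field N M p q =
        gstep field N M (cellA field p q) 0 ((p : Int) - 1, (q : Int))
        + gstep field N M (cellA field p q) 0 ((p : Int) + 1, (q : Int))
        + gstep field N M (cellA field p q) 0 ((p : Int), (q : Int) - 1)
        + gstep field N M (cellA field p q) 0 ((p : Int), (q : Int) + 1) := by
      simp only [gatherCell, List.foldl_cons, List.foldl_nil, if_pos hv]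
      rw [gstep_shift field N M (cellA field p q)
          (gstep field N M (cellA field p q)
            (gstep field N M (cellA field p q)
              (gstep field N M (cellA field p q) 0 ((p : Int) - 1, (q : Int)))
              ((p : Int) + 1, (q : Int)))
            ((p : Int), (q : Int) - 1))
          ((p : Int), (q : Int) + 1),
        gstep_shift field N M (cellA field p q)
          (gstep field N M (cellA field p q)
            (gstep field N M (cellA field p q) 0 ((p : Int) - 1, (q : Int)))
            ((p : Int) + 1, (q : Int)))
          ((p : Int), (q : Int) - 1),
        gstep_shift field N M (cellA field p q)
          (gstep field N M (cellA field p q) 0 ((p : Int) - 1, (q : Int)))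
          ((p : Int) + 1, (q : Int))]
    rw [hfold, gup field N M p q hp hq hv, gdown field N M p q hq hv,
      gleft field N M p q hp hq hv, gright field N M p q hp hv]
    ring

-- addInto ----------------------------------------------------------------------
theorem addInto_length (row d : List Int) (h : d.length ≤ row.length) :
    (addInto row d).length = row.length := by
  induction d generalizing row with
  | nil => cases row <;> simp [addInto]
  | cons y ds ih =>
    cases row with
    | nil => simp at h
    | cons x r =>
      simp only [addInto, List.length_cons]
      rw [ih r (by simpa using h)]

theorem addInto_getD (row d : List Int) (h : d.length ≤ row.length) (c : Nat) :
    (addInto row d).getD c 0 = row.getD c 0 + d.getD c 0 := by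
  induction d generalizing row c with
  | nil => cases row <;> simp [addInto]
  | cons y ds ih =>
    cases row with
    | nil => simp at h
    | cons x r =>
      cases c with
      | zero => simp [addInto]
      | succ c => simpa [addInto] using ih r (by simpa using h) c

theorem getD_map_range (n : Nat) (f : Nat → Int) (c : Nat) :
    ((List.range n).map f).getD c 0 = if c < n then f c else 0 := by
  by_cases h : c < n
  · rw [List.getD_eq_getElem _ _ (by simpa using h)]
    simp [h]
  · rw [List.getD_eq_default _ _ (by simpa using Nat.le_of_not_lt h)]
    simp [h]

theorem cellA_eq_getElem (g : List (List Int)) (r c : Nat)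
    (hr : r < g.length) (hc : c < (g[r]'hr).length) :
    cellA g r c = (g[r]'hr)[c]'hc := by
  simp [cellA, List.getD_eq_getElem?_getD, List.getElem?_eq_getElem hr,
    List.getElem?_eq_getElem hc]

-- pass 2 -----------------------------------------------------------------------
theorem pass2_main (field : List (List Int)) (hpre : Pre_fish_diff field) (p q : Nat) :
    ShapeP field (fish_diff field) ∧
    cellA (fish_diff field) p q = cellA field p q +
      (if p < field.length ∧ q < (field.headD []).length then
        cellA (fdiffA field field.length (field.headD []).length) p q else 0) := by
  have hrowlen : ∀ r, r < field.length →
      (field.headD []).length ≤ (field.getD r []).length := by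
    intro r hr
    have h : field.getD r [] = field[r] := by
      simp [List.getD_eq_getElem?_getD, List.getElem?_eq_getElem hr]
    rw [h]
    exact hpre.2 _ (List.getElem_mem hr)
  set N := field.length with hN
  set M := (field.headD []).length with hM
  set fd := fdiffA field N M with hfd
  have hrowmain : ∀ (g : List (List Int)) (r : Nat), r ∈ List.range N → ShapeP field g →
      ShapeP field (passRow fd M g r) ∧
      cellA (passRow fd M g r) p q = cellA g p q +
        ((List.range M).map (fun c => if r = p ∧ c = q then cellA fd r c else 0)).sum := by
    intro g r hrmem hg
    have hrN : r < N := List.mem_range.mp hrmem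
    unfold passRow
    exact foldl_cell_sum (ShapeP field) (passCell fd r)
      (fun c => if r = p ∧ c = q then cellA fd r c else 0) p q (List.range M)
      (fun g c _ hg => ShapeP_addAt _ _ _ _ _ hg)
      (fun g c hc hg => by
        have hcM : c < M := List.mem_range.mp hc
        unfold passCell
        exact cellA_addAt _ _ _ _ _ _ (by rw [hg.1]; exact hrN)
          (by rw [hg.2 r]; exact Nat.lt_of_lt_of_le hcM (hrowlen r hrN)))
      g hg
  have h := foldl_cell_sum (ShapeP field) (passRow fd M)
    (fun r => ((List.range M).map (fun c => if r = p ∧ c = q then cellA fd r c else 0)).sum)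
    p q (List.range N)
    (fun g r hr hg => (hrowmain g r hr hg).1)
    (fun g r hr hg => (hrowmain g r hr hg).2)
    field ⟨rfl, fun _ => rfl⟩
  have hshow : fish_diff field = (List.range N).foldl (passRow fd M) field := rfl
  rw [hshow]
  refine ⟨h.1, ?_⟩
  rw [h.2, sum2_ite N M p q (fun r c => cellA fd r c)]

-- main equivalence -------------------------------------------------------------
theorem fish_diff_eq_alt (field : List (List Int)) (hpre : Pre_fish_diff field) :
    fish_diff field = fish_diff_alt field := by
  set N := field.length with hN
  set M := (field.headD []).length with hM
  have hmain := fun p q => pass2_main field hpre p q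
  have hshape : ShapeP field (fish_diff field) := (hmain 0 0).1
  have hrowlen : ∀ r, (hr : r < field.length) → M ≤ field[r].length := by
    intro r hr; exact hpre.2 _ (List.getElem_mem hr)
  have hlenA : (fish_diff field).length = N := hshape.1
  have haltB : fish_diff_alt field = List.zipWith addInto field
      ((List.range N).map (fun r => (List.range M).map (fun c => gatherCell field N M r c))) := rfl
  have hlenB : (fish_diff_alt field).length = N := by
    rw [haltB, List.length_zipWith]
    simp
    omega
  apply List.ext_getElem (by rw [hlenA, hlenB])
  intro r h1 h2
  have hrN : r < N := by rw [← hlenA]; exact h1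
  have hrF : r < field.length := hrN
  -- the r-th row of B
  have hBrow : (fish_diff_alt field)[r]'h2 =
      addInto (field[r]'hrF) ((List.range M).map (fun c => gatherCell field N M r c)) := by
    have : r < (List.zipWith addInto field
        ((List.range N).map (fun r => (List.range M).map (fun c => gatherCell field N M r c)))).length := by
      rw [← haltB]; exact h2
    rw [List.getElem_of_eq haltB h2, List.getElem_zipWith]
    congr 1
    rw [List.getElem_map, List.getElem_range]
  have hdr : ((List.range M).map (fun c => gatherCell field N M r c)).length = M := by simp
  have hABlen : ((fish_diff field)[r]'h1).length = (field[r]'hrF).length := by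
    have hA := hshape.2 r
    rwa [List.getD_eq_getElem _ _ h1, List.getD_eq_getElem _ _ hrF] at hA
  have hBlen : ((fish_diff_alt field)[r]'h2).length = (field[r]'hrF).length := by
    rw [hBrow, addInto_length]
    rw [hdr]; exact hrowlen r hrF
  apply List.ext_getElem (by rw [hABlen, hBlen])
  intro c hc1 hc2
  have hcF : c < (field[r]'hrF).length := by rw [← hABlen]; exact hc1
  -- A's entry
  have hAval : ((fish_diff field)[r]'h1)[c]'hc1 = (field[r]'hrF)[c]'hcF +
      (if c < M then cellA (fdiffA field N M) r c else 0) := by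
    rw [← cellA_eq_getElem _ _ _ h1 hc1, ← cellA_eq_getElem _ _ _ hrF hcF]
    rw [(hmain r c).2]
    congr 1
    by_cases hcM : c < M
    · rw [if_pos ⟨hrF, hcM⟩, if_pos hcM]
    · rw [if_neg (fun h => hcM h.2), if_neg hcM]
  -- B's entry
  have hBval : ((fish_diff_alt field)[r]'h2)[c]'hc2 = (field[r]'hrF)[c]'hcF +
      (if c < M then gatherCell field N M r c else 0) := by
    have hc2' : c < ((fish_diff_alt field)[r]'h2).length := hc2
    rw [← List.getD_eq_getElem _ 0 hc2, hBrow, addInto_getD _ _ (by rw [hdr]; exact hrowlen r hrF),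
      getD_map_range, List.getD_eq_getElem _ 0 hcF]
  rw [hAval, hBval]
  by_cases hcM : c < M
  · rw [if_pos hcM, if_pos hcM, fdiffA_cell, crux field N M r c hrN hcM]
  · rw [if_neg hcM, if_neg hcM]

-- ===== VERDICT (by name: the statement is the Claim_ definition above) =====
theorem fish_diff_spec : Claim_equal_fish_diff := by
  intro field _ hpre
  exact fish_diff_eq_alt field hpre
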